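-- pv_equiv track=rewrite | github.com/JoeSchiff/Joes_Jorbs | srv/cgi-bin/results.py | sort_keywords_into_fm_lists
-- ===== SOURCE A (Python) =====
-- def sort_keywords_into_fm_lists(keyword_list):
--     # Lists containing keywords by keyword length
--     zero_edits_l = []
--     one_edits_l = []
--     two_edits_l = []
--
--     # Sort keywords into lists based on keyword length. Longer keywords get more regex edits
--     for keyword in keyword_list:
--         if len(keyword) > 17:
--             two_edits_l.append(keyword)
--         elif len(keyword) > 8:
--             one_edits_l.append(keyword)
--         else:
--             zero_edits_l.append(keyword)
--
--     return zero_edits_l, one_edits_l, two_edits_l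
-- ===== SOURCE B (Python) =====
-- def sort_keywords_into_fm_lists(keyword_list):
--     # Three independent filtering passes, one per length band.
--     zero_edits_l = [k for k in keyword_list if len(k) <= 8]
--     one_edits_l = [k for k in keyword_list if 8 < len(k) <= 17]
--     two_edits_l = [k for k in keyword_list if len(k) > 17]
--     return zero_edits_l, one_edits_l, two_edits_l
-- ===== Notes on version B (the rewrite author's own statement) =====
-- stated objective: simpler
-- what changed: Replaced the single accumulate-into-three-lists loop with three independent filter passes (list comprehensions), one per length band.
import Mathlib
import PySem

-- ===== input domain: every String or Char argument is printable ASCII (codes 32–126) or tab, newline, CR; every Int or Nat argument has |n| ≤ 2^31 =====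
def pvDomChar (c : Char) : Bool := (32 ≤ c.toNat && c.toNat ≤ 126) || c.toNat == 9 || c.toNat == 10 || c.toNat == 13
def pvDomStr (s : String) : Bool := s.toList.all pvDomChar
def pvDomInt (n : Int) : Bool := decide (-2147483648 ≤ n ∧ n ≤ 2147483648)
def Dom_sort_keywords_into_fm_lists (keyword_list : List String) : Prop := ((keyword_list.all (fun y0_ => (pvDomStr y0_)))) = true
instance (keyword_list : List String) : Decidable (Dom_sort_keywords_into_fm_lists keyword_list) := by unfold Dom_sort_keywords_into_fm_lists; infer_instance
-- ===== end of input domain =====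

/- B: three independent filter passes per length band instead of one accumulate-into-three-lists loop; objective: simpler. -/


-- ===== PORT A =====
def sort_keywords_into_fm_lists (keyword_list : List String) : List String × List String × List String :=
  -- single pass: fold carrying the three accumulator lists, appending per branch
  let st := keyword_list.foldl (fun (acc : List String × List String × List String) keyword =>
    let (zero_edits_l, one_edits_l, two_edits_l) := acc
    if PySem.Str.len keyword > 17 then
      (zero_edits_l, one_edits_l, two_edits_l ++ [keyword])
    else if PySem.Str.len keyword > 8 then
      (zero_edits_l, one_edits_l ++ [keyword], two_edits_l)
    else
      (zero_edits_l ++ [keyword], one_edits_l, two_edits_l)) ([], [], [])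
  st

-- ===== PORT B =====
def sort_keywords_into_fm_lists_alt (keyword_list : List String) : List String × List String × List String :=
  -- three independent filter passes, one per length band
  (keyword_list.filter (fun k => PySem.Str.len k ≤ 8),
   keyword_list.filter (fun k => 8 < PySem.Str.len k && PySem.Str.len k ≤ 17),
   keyword_list.filter (fun k => PySem.Str.len k > 17))

-- ===== PRECONDITION & SPEC =====
def Spec_sort_keywords_into_fm_lists (keyword_list : List String) (out : List String × List String × List String) : Prop := out = sort_keywords_into_fm_lists_alt keyword_list
instance (keyword_list : List String) (out : List String × List String × List String) : Decidable (Spec_sort_keywords_into_fm_lists keyword_list out) := by unfold Spec_sort_keywords_into_fm_lists; infer_instance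

-- ===== CLAIM (what is proved, stated in full; the proofs are below) =====
def Claim_equal_sort_keywords_into_fm_lists : Prop := ∀ (keyword_list : List String), Dom_sort_keywords_into_fm_lists keyword_list → Spec_sort_keywords_into_fm_lists keyword_list (sort_keywords_into_fm_lists keyword_list)

-- ===== LEMMAS AND PROOFS =====
theorem pv_fold_eq (keyword_list : List String) :
    sort_keywords_into_fm_lists keyword_list = sort_keywords_into_fm_lists_alt keyword_list := by
  unfold sort_keywords_into_fm_lists sort_keywords_into_fm_lists_alt
  suffices h : ∀ (z o t : List String),
      keyword_list.foldl (fun (acc : List String × List String × List String) keyword =>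
        let (zero_edits_l, one_edits_l, two_edits_l) := acc
        if PySem.Str.len keyword > 17 then
          (zero_edits_l, one_edits_l, two_edits_l ++ [keyword])
        else if PySem.Str.len keyword > 8 then
          (zero_edits_l, one_edits_l ++ [keyword], two_edits_l)
        else
          (zero_edits_l ++ [keyword], one_edits_l, two_edits_l)) (z, o, t)
      = (z ++ keyword_list.filter (fun k => PySem.Str.len k ≤ 8),
         o ++ keyword_list.filter (fun k => 8 < PySem.Str.len k && PySem.Str.len k ≤ 17),
         t ++ keyword_list.filter (fun k => PySem.Str.len k > 17)) by
    simpa using h [] [] []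
  induction keyword_list with
  | nil => simp
  | cons x xs ih =>
    intro z o t
    simp only [PySem.Str.len_eq, String.length_toList] at ih
    simp only [List.foldl_cons, List.filter_cons, PySem.Str.len_eq, String.length_toList]
    by_cases h17 : (17 : Int) < (x.length : Int)
    · have h8 : ¬ ((x.length : Int) ≤ 8) := by omega
      have hm : ¬ ((x.length : Int) ≤ 17) := by omega
      simp only [if_pos h17]
      refine (ih z o (t ++ [x])).trans ?_
      simp [h8, hm, h17]
    · by_cases h8 : (8 : Int) < (x.length : Int)
      · have hz : ¬ ((x.length : Int) ≤ 8) := by omega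
        have hm : (x.length : Int) ≤ 17 := by omega
        simp only [if_neg h17, if_pos h8]
        refine (ih z (o ++ [x]) t).trans ?_
        simp [hz, h8, hm, h17]
      · have hz : (x.length : Int) ≤ 8 := by omega
        simp only [if_neg h17, if_neg h8]
        refine (ih (z ++ [x]) o t).trans ?_
        simp [hz, h8, h17]

-- ===== VERDICT (by name: the statement is the Claim_ definition above) =====
theorem sort_keywords_into_fm_lists_spec : Claim_equal_sort_keywords_into_fm_lists := by
  intro keyword_list _
  unfold Spec_sort_keywords_into_fm_lists
  exact pv_fold_eq keyword_list
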